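-- pv_equiv track=rewrite | github.com/antonwiklund99/AdventofCode | 2024/day7.py | rec
-- ===== SOURCE A (Python) =====
-- def rec(r, n, ns):
--     if n > r:
--         return False
--     if len(ns) == 1 and (r == ns[0] * n or r == ns[0] + n):
--         return True
--     elif len(ns) == 1:
--         return False
--     elif rec(r, n * ns[0], ns[1:]) or rec(r, n + ns[0], ns[1:]):
--         return True
--     return False
-- ===== SOURCE B (Python) =====
-- def rec(r, n, ns):
--     if n > r:
--         return False
--     last = ns[-1]
--     vals = {n}
--     for e in ns[:-1]:
--         vals = {w for v in vals for w in (v * e, v + e) if w <= r}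
--     return any(r == last * v or r == last + v for v in vals)
-- ===== Notes on version B (the rewrite author's own statement) =====
-- stated objective: alternative
-- what changed: Replaces A's binary recursion over operator choices by an iterative breadth-first pass that maintains the set of reachable accumulator values (pruned to values <= r, mirroring A's n > r cut) and checks the final element against the target in one scan.
import Mathlib
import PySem

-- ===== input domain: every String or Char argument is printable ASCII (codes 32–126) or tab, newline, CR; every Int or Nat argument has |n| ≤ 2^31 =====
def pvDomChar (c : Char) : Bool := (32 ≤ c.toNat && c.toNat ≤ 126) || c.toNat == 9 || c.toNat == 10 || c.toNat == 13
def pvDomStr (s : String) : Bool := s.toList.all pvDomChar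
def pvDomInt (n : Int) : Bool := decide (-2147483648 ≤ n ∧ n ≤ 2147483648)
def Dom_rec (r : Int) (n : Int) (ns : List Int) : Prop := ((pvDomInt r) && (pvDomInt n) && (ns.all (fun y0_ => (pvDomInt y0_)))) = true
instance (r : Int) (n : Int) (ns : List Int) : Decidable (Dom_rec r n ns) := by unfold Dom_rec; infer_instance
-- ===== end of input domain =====

-- B replaces A's exponential recursion by an iterative level-by-level set of reachable accumulator values; same results on Pre_.

-- ===== PORT A =====
def rec (r : Int) (n : Int) (ns : List Int) : Bool :=
  if n > r then false
  else
    match ns with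
    | [] => false            -- Python raises IndexError here (ns[0] on []); excluded by Pre_rec
    | [x] => decide (r = x * n ∨ r = x + n)
    | x :: rest => rec r (n * x) rest || rec r (n + x) rest

-- ===== PORT B =====
-- one loop step: vals = {w for v in vals for w in (v*e, v+e) if w <= r}
def recStep (r : Int) (e : Int) (S : PySem.Set Int) : PySem.Set Int :=
  PySem.Set.ofList ((S.flatMap (fun v => [v * e, v + e])).filter (fun w => w ≤ r))

def rec_alt (r : Int) (n : Int) (ns : List Int) : Bool :=
  if n > r then false
  else
    match ns.getLast? with
    | none => false          -- Python raises IndexError here (ns[-1] on []); excluded by Pre_rec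
    | some last =>
      (ns.dropLast.foldl (fun S e => recStep r e S) (PySem.Set.ofList [n])).any
        (fun v => decide (r = last * v ∨ r = last + v))

-- ===== PRECONDITION & SPEC =====
-- Pre_ excludes exactly the inputs where the Python A raises IndexError: ns = [] with n ≤ r (B raises there too).
def Pre_rec (r : Int) (n : Int) (ns : List Int) : Prop := ns ≠ [] ∨ n > r
instance (r : Int) (n : Int) (ns : List Int) : Decidable (Pre_rec r n ns) := by unfold Pre_rec; infer_instance
def pvWitness_rec : Int × Int × List Int := (10, 1, [2, 3])
def Spec_rec (r : Int) (n : Int) (ns : List Int) (out : Bool) : Prop := out = rec_alt r n ns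
instance (r : Int) (n : Int) (ns : List Int) (out : Bool) : Decidable (Spec_rec r n ns out) := by unfold Spec_rec; infer_instance

-- ===== CLAIM (what is proved, stated in full; the proofs are below) =====
def Claim_equal_rec : Prop := ∀ (r : Int) (n : Int) (ns : List Int), Dom_rec r n ns → Pre_rec r n ns → Spec_rec r n ns (rec r n ns)

-- ===== LEMMAS AND PROOFS =====

lemma any_ofList {p : Int → Bool} (L : List Int) : (PySem.Set.ofList L).any p = L.any p := by
  rw [Bool.eq_iff_iff]
  simp only [List.any_eq_true]
  constructor
  · rintro ⟨x, hx, hp⟩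
    exact ⟨x, (PySem.Set.mem_ofList _ _).mp hx, hp⟩
  · rintro ⟨x, hx, hp⟩
    exact ⟨x, (PySem.Set.mem_ofList _ _).mpr hx, hp⟩

lemma any_congr_mem {p q : Int → Bool} (L : List Int)
    (h : ∀ v ∈ L, p v = q v) : L.any p = L.any q := by
  induction L with
  | nil => rfl
  | cons x xs ih =>
    simp only [List.any_cons, h x (by simp), ih (fun v hv => h v (by simp [hv]))]

lemma rec_cons₂ (r n x y : Int) (ys : List Int) (h : ¬ n > r) :
    rec r n (x :: y :: ys) = (rec r (n * x) (y :: ys) || rec r (n + x) (y :: ys)) := by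
  rw [rec]
  · simp [h]
  · simp

lemma rec_of_gt {r n : Int} (ns : List Int) (h : n > r) : rec r n ns = false := by
  cases ns with
  | nil => simp [rec, h]
  | cons x rest => cases rest <;> simp [rec, h]

-- one level of B's loop, read through an arbitrary continuation p that is false above r
lemma any_step (r e : Int) (S : List Int) (p : Int → Bool) (hp : ∀ w, w > r → p w = false) :
    (recStep r e S).any p = S.any (fun v => p (v * e) || p (v + e)) := by
  unfold recStep
  rw [any_ofList]
  induction S with
  | nil => rfl
  | cons v S ih =>
    rw [List.flatMap_cons, List.filter_append, List.any_append, ih, List.any_cons]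
    congr 1
    by_cases h1 : v * e ≤ r <;> by_cases h2 : v + e ≤ r
    · simp [h1, h2]
    · simp [h1, h2, hp (v + e) (by omega)]
    · simp [h1, h2, hp (v * e) (by omega)]
    · simp [h1, h2, hp (v * e) (by omega), hp (v + e) (by omega)]

-- main invariant: folding over ns and then testing the last element equals running A from every value in S
lemma go_eq (r last : Int) : ∀ (ns : List Int) (S : List Int), (∀ v ∈ S, v ≤ r) →
    ((ns.foldl (fun S e => recStep r e S) S).any (fun v => decide (r = last * v ∨ r = last + v))
      = S.any (fun v => rec r v (ns ++ [last]))) := by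
  intro ns
  induction ns with
  | nil =>
    intro S hS
    simp only [List.foldl_nil, List.nil_append]
    apply any_congr_mem
    intro v hv
    have hle : ¬ v > r := not_lt.mpr (hS v hv)
    simp [rec, hle]
  | cons e ns ih =>
    intro S hS
    have hstep : ∀ v ∈ recStep r e S, v ≤ r := by
      intro v hv
      have := List.of_mem_filter ((PySem.Set.mem_ofList _ _).mp hv)
      simpa using this
    rw [List.foldl_cons, ih (recStep r e S) hstep,
        any_step r e S _ (fun w hw => rec_of_gt _ hw)]
    apply any_congr_mem
    intro v hv
    have hle : ¬ v > r := not_lt.mpr (hS v hv)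
    rcases hn : ns ++ [last] with _ | ⟨y, ys⟩
    · exact absurd hn (by simp)
    · rw [List.cons_append, hn, rec_cons₂ r v e y ys hle, ← hn]

-- ===== VERDICT (by name: the statement is the Claim_ definition above) =====
theorem rec_spec : Claim_equal_rec := by
  intro r n ns _ hpre
  unfold Spec_rec rec_alt
  by_cases h : n > r
  · simp [h, rec_of_gt ns h]
  · have hne : ns ≠ [] := by
      rcases hpre with h1 | h1
      · exact h1
      · exact absurd h1 h
    rcases List.eq_nil_or_concat ns with rfl | ⟨init, last, rfl⟩
    · exact absurd rfl hne
    rw [List.concat_eq_append]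
    have hg : (init ++ [last]).getLast? = some last := by
      simp
    have hd : (init ++ [last]).dropLast = init := List.dropLast_concat
    rw [if_neg h, hg, hd]
    have hofn : PySem.Set.ofList [n] = [n] := rfl
    rw [hofn]
    show rec r n (init ++ [last])
        = (init.foldl (fun S e => recStep r e S) [n]).any
            (fun v => decide (r = last * v ∨ r = last + v))
    rw [go_eq r last init [n] (by intro v hv; simp at hv; omega)]
    simp
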